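-- pv_equiv track=rewrite | github.com/pilgrimbeart/synth | synth/analysis/mergejson.py | find_all_properties
-- ===== SOURCE A (Python) =====
-- def find_all_properties(messages):
--     properties = []
--     for message in messages:
--         for prop in message:
--             if prop not in ["$ts", "$id"]:  # Ignore these
--                 if prop not in properties:
--                     properties.append(prop)
--     return sorted(properties)   # Keeping the order consistent just helps with readability
-- ===== SOURCE B (Python) =====
-- def find_all_properties(messages):
--     # Collect every key (with duplicates), sort once, then drop adjacent repeats.
--     keys = sorted(k for m in messages for k in m if k not in ("$ts", "$id"))
--     out = []
--     for k in keys: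
--         if not out or out[-1] != k:
--             out.append(k)
--     return out
-- ===== Notes on version B (the rewrite author's own statement) =====
-- stated objective: alternative
-- what changed: A dedups while collecting (linear membership scan of the accumulator per key) and sorts the unique keys at the end; B collects all keys with duplicates, sorts the flat list once, and dedups adjacent equal keys in one linear pass.
import Mathlib
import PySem

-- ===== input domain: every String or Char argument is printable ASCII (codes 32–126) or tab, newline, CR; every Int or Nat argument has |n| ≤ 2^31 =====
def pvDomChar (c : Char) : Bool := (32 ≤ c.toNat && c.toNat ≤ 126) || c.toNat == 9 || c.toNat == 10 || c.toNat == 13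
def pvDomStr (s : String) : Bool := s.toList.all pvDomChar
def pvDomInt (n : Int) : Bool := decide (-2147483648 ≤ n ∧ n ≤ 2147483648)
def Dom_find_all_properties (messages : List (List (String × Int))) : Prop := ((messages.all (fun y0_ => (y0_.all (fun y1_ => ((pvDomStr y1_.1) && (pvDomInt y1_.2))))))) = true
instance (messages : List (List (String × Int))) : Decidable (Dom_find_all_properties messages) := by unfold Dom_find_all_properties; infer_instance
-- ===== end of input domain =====

-- B replaces A's dedup-while-collecting (membership scan of the accumulator per key, sort at
-- the end) by collect-all / sort-once / drop-adjacent-repeats: an alternative decomposition.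

-- ===== PORT A =====
-- Nested loop: append each key not in {"$ts","$id"} to `properties` if not already there; sort.
def find_all_properties (messages : List (List (String × Int))) : List String :=
  let properties := messages.foldl (fun properties message =>
    message.foldl (fun properties prop =>
      if prop.1 = "$ts" ∨ prop.1 = "$id" then properties
      else if prop.1 ∈ properties then properties
      else properties ++ [prop.1]) properties) []
  PySem.List.sorted properties (fun x => x) false

-- ===== PORT B =====
-- Gather all keys (with duplicates) skipping "$ts"/"$id", sort once, then one linear pass
-- emitting a key only when it differs from the last emitted one (`out[-1]` = getLast?).
def find_all_properties_alt (messages : List (List (String × Int))) : List String :=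
  let keys := PySem.List.sorted
    (messages.flatMap (fun m =>
      (m.map Prod.fst).filter (fun k => decide (¬(k = "$ts" ∨ k = "$id")))))
    (fun x => x) false
  keys.foldl (fun out k =>
    if out = [] ∨ out.getLast? ≠ some k then out ++ [k] else out) []

-- ===== PRECONDITION & SPEC =====
def Spec_find_all_properties (messages : List (List (String × Int))) (out : List String) : Prop := out = find_all_properties_alt messages
instance (messages : List (List (String × Int))) (out : List String) : Decidable (Spec_find_all_properties messages out) := by unfold Spec_find_all_properties; infer_instance

-- ===== CLAIM (what is proved, stated in full; the proofs are below) =====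
def Claim_equal_find_all_properties : Prop := ∀ (messages : List (List (String × Int))), Dom_find_all_properties messages → Spec_find_all_properties messages (find_all_properties messages)

-- ===== LEMMAS AND PROOFS =====

-- A's inner loop: membership of the accumulated distinct-key list.
theorem pvInnerA_mem (m : List (String × Int)) (acc : List String) (x : String) :
    x ∈ m.foldl (fun properties prop =>
      if prop.1 = "$ts" ∨ prop.1 = "$id" then properties
      else if prop.1 ∈ properties then properties
      else properties ++ [prop.1]) acc
    ↔ x ∈ acc ∨ x ∈ (m.map Prod.fst).filter (fun k => decide (¬(k = "$ts" ∨ k = "$id"))) := by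
  induction m generalizing acc with
  | nil => simp
  | cons p t ih =>
    simp only [List.foldl_cons]
    by_cases hsp : p.1 = "$ts" ∨ p.1 = "$id"
    · have hf : ((p :: t).map Prod.fst).filter (fun k => decide (¬(k = "$ts" ∨ k = "$id")))
          = (t.map Prod.fst).filter (fun k => decide (¬(k = "$ts" ∨ k = "$id"))) := by
        rcases hsp with h | h <;> simp [h]
      rw [if_pos hsp, ih, hf]
    · have hf : ((p :: t).map Prod.fst).filter (fun k => decide (¬(k = "$ts" ∨ k = "$id")))
          = p.1 :: (t.map Prod.fst).filter (fun k => decide (¬(k = "$ts" ∨ k = "$id"))) := by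
        have h1 : p.1 ≠ "$ts" := fun h => hsp (Or.inl h)
        have h2 : p.1 ≠ "$id" := fun h => hsp (Or.inr h)
        simp [h1, h2]
      rw [if_neg hsp, hf]
      by_cases hmem : p.1 ∈ acc
      · rw [if_pos hmem, ih]
        simp only [List.mem_cons]
        constructor
        · tauto
        · rintro (h | h | h)
          · tauto
          · exact Or.inl (h ▸ hmem)
          · tauto
      · rw [if_neg hmem, ih]
        simp only [List.mem_append, List.mem_singleton, List.mem_cons]
        tauto

-- A's inner loop preserves Nodup.
theorem pvInnerA_nodup (m : List (String × Int)) (acc : List String) (h : acc.Nodup) :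
    (m.foldl (fun properties prop =>
      if prop.1 = "$ts" ∨ prop.1 = "$id" then properties
      else if prop.1 ∈ properties then properties
      else properties ++ [prop.1]) acc).Nodup := by
  induction m generalizing acc with
  | nil => exact h
  | cons p t ih =>
    simp only [List.foldl_cons]
    by_cases hsp : p.1 = "$ts" ∨ p.1 = "$id"
    · simpa [hsp] using ih acc h
    · by_cases hmem : p.1 ∈ acc
      · simpa [hsp, hmem] using ih acc h
      · simp only [if_neg hsp, if_neg hmem]
        refine ih _ ?_
        rw [List.nodup_append]
        refine ⟨h, List.nodup_singleton _, ?_⟩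
        intro a ha b hb
        rw [List.mem_singleton] at hb
        rw [hb]
        exact fun he => hmem (he ▸ ha)

-- A's outer loop: membership.
theorem pvOuterA_mem (messages : List (List (String × Int))) (acc : List String) (x : String) :
    x ∈ messages.foldl (fun properties message =>
      message.foldl (fun properties prop =>
        if prop.1 = "$ts" ∨ prop.1 = "$id" then properties
        else if prop.1 ∈ properties then properties
        else properties ++ [prop.1]) properties) acc
    ↔ x ∈ acc ∨ x ∈ messages.flatMap (fun m =>
        (m.map Prod.fst).filter (fun k => decide (¬(k = "$ts" ∨ k = "$id")))) := by
  induction messages generalizing acc with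
  | nil => simp
  | cons m t ih =>
    simp only [List.foldl_cons, List.flatMap_cons, List.mem_append, ih, pvInnerA_mem]
    tauto

-- A's outer loop preserves Nodup.
theorem pvOuterA_nodup (messages : List (List (String × Int))) (acc : List String)
    (h : acc.Nodup) :
    (messages.foldl (fun properties message =>
      message.foldl (fun properties prop =>
        if prop.1 = "$ts" ∨ prop.1 = "$id" then properties
        else if prop.1 ∈ properties then properties
        else properties ++ [prop.1]) properties) acc).Nodup := by
  induction messages generalizing acc with
  | nil => exact h
  | cons m t ih => exact ih _ (pvInnerA_nodup m acc h)

-- B's dedup pass: membership is the input's plus the accumulator's.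
theorem pvDedup_mem (l acc : List String) (x : String) :
    x ∈ l.foldl (fun out k =>
      if out = [] ∨ out.getLast? ≠ some k then out ++ [k] else out) acc
    ↔ x ∈ acc ∨ x ∈ l := by
  induction l generalizing acc with
  | nil => simp
  | cons k t ih =>
    simp only [List.foldl_cons]
    by_cases hc : acc = [] ∨ acc.getLast? ≠ some k
    · rw [if_pos hc, ih]
      simp only [List.mem_append, List.mem_singleton, List.mem_cons]
      tauto
    · have hc2 : acc.getLast? = some k := by
        by_contra hne
        exact hc (Or.inr hne)
      have hk : k ∈ acc := List.mem_of_getLast? hc2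
      rw [if_neg hc, ih]
      simp only [List.mem_cons]
      constructor
      · rintro (h | h)
        · tauto
        · tauto
      · rintro (h | h | h)
        · tauto
        · exact Or.inl (h ▸ hk)
        · tauto

-- In a strictly increasing list, every element is ≤ the last one.
theorem pvLe_getLast? {acc : List String} {a m : String} (hp : acc.Pairwise (· < ·))
    (ha : a ∈ acc) (hm : acc.getLast? = some m) : a ≤ m := by
  induction acc with
  | nil => cases ha
  | cons b t ih =>
    cases t with
    | nil =>
      simp only [List.mem_singleton] at ha
      simp only [List.getLast?_singleton, Option.some.injEq] at hm
      subst ha; subst hm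
      exact le_refl _
    | cons c u =>
      rw [List.getLast?_cons_cons] at hm
      rcases List.mem_cons.mp ha with rfl | ha'
      · have hmmem : m ∈ c :: u := List.mem_of_getLast? hm
        exact le_of_lt ((List.pairwise_cons.mp hp).1 m hmmem)
      · exact ih (List.pairwise_cons.mp hp).2 ha' hm

-- B's dedup pass on a ≤-sorted list yields a strictly increasing list.
theorem pvDedup_pairwise (l : List String) (hl : l.Pairwise (· ≤ ·)) :
    ∀ acc : List String, acc.Pairwise (· < ·) → (∀ a ∈ acc, ∀ b ∈ l, a ≤ b) →
    (l.foldl (fun out k =>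
      if out = [] ∨ out.getLast? ≠ some k then out ++ [k] else out) acc).Pairwise (· < ·) := by
  induction l with
  | nil => intro acc hacc _; exact hacc
  | cons k t ih =>
    intro acc hacc hle
    obtain ⟨hk, ht⟩ := List.pairwise_cons.mp hl
    simp only [List.foldl_cons]
    by_cases hc : acc = [] ∨ acc.getLast? ≠ some k
    · rw [if_pos hc]
      refine ih ht (acc ++ [k]) ?_ ?_
      · rw [List.pairwise_append]
        refine ⟨hacc, List.pairwise_singleton _ _, ?_⟩
        intro a ha b hb
        rw [List.mem_singleton] at hb
        rw [hb]
        rcases hc with hc | hc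
        · subst hc; cases ha
        · obtain ⟨m, hm⟩ := Option.isSome_iff_exists.mp
            (List.getLast?_isSome.mpr (List.ne_nil_of_mem ha))
          have ham : a ≤ m := pvLe_getLast? hacc ha hm
          have hmk : m ≤ k := hle m (List.mem_of_getLast? hm) k List.mem_cons_self
          have hne : m ≠ k := fun h => hc (h ▸ hm)
          exact lt_of_le_of_lt ham (lt_of_le_of_ne hmk hne)
      · intro a ha b hb
        rcases List.mem_append.mp ha with ha' | ha'
        · exact hle a ha' b (List.mem_cons_of_mem _ hb)
        · rw [List.mem_singleton] at ha'; subst ha'; exact hk b hb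
    · rw [if_neg hc]
      exact ih ht acc hacc (fun a ha b hb => hle a ha b (List.mem_cons_of_mem _ hb))

-- ===== VERDICT (by name: the statement is the Claim_ definition above) =====
theorem find_all_properties_spec : Claim_equal_find_all_properties := by
  intro messages _
  unfold Spec_find_all_properties find_all_properties find_all_properties_alt
  set F := messages.flatMap (fun m =>
    (m.map Prod.fst).filter (fun k => decide (¬(k = "$ts" ∨ k = "$id")))) with hF
  set props := messages.foldl (fun properties message =>
    message.foldl (fun properties prop =>
      if prop.1 = "$ts" ∨ prop.1 = "$id" then properties
      else if prop.1 ∈ properties then properties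
      else properties ++ [prop.1]) properties) ([] : List String) with hprops
  set B := (PySem.List.sorted F (fun x => x) false).foldl (fun out k =>
    if out = [] ∨ out.getLast? ≠ some k then out ++ [k] else out) ([] : List String) with hB
  have hsortpw : (PySem.List.sorted F (fun x => x) false).Pairwise (· ≤ ·) := by
    have := PySem.List.sorted_pairwise (xs := F) (key := fun x => x)
    simpa using this
  have hBpw : B.Pairwise (· < ·) :=
    pvDedup_pairwise _ hsortpw [] (List.Pairwise.nil) (by simp)
  have hBnd : B.Nodup := hBpw.imp ne_of_lt
  have hPnd : props.Nodup := pvOuterA_nodup messages [] List.nodup_nil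
  have hmem : ∀ x, x ∈ B ↔ x ∈ props := by
    intro x
    rw [hB, pvDedup_mem, hprops, pvOuterA_mem]
    simp only [List.not_mem_nil, false_or]
    exact PySem.List.mem_sorted F (fun x => x) false x
  have hperm : B.Perm props := (List.perm_ext_iff_of_nodup hBnd hPnd).mpr hmem
  exact PySem.List.sorted_eq_of_perm_of_pairwise_lt props B (fun x => x) hperm hBpw
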